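-- pv_equiv track=rewrite | github.com/pablo-abagnale/proyectos-AED-2024 | TP2 - Codigos postales 2.0/tp2 con r13.py | Type_of_controll
-- ===== SOURCE A (Python) =====
-- def Type_of_controll(line):
--     vc = False
--     hc = False
--     for i in line:
--         if i == "H":
--             vc = True
--         else:
--             if i == 'C' and vc == True:
--                 hc = True
--             vc = False
--     if hc == True:  # Hard control
--         control = 'Hard Control'
--     else:  # Soft control
--         control = 'Soft Control'
--     return control
-- ===== SOURCE B (Python) =====
-- def Type_of_controll(line):
--     return 'Hard Control' if 'HC' in line else 'Soft Control'
-- ===== Notes on version B (the rewrite author's own statement) =====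
-- stated objective: idiomatic
-- what changed: Replaces the explicit two-flag character scan with Python's built-in substring membership test, which is exactly the condition the scan detects.
import Mathlib
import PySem

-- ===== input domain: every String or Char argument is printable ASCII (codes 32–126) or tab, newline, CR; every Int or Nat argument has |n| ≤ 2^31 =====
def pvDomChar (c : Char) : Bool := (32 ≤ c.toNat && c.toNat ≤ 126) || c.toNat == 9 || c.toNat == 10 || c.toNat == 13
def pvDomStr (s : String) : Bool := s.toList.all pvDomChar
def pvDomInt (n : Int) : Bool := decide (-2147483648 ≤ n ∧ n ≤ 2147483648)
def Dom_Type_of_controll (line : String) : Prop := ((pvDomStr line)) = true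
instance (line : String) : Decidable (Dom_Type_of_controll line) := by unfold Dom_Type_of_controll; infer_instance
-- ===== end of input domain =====

-- B replaces A's two-flag character scan by the substring test 'HC' in line (idiomatic; same O(n) cost).

-- ===== PORT A =====
-- literal transliteration of A: fold over the characters carrying the two flags (vc, hc)
def Type_of_controll (line : String) : String :=
  let st := line.toList.foldl
    (fun (p : Bool × Bool) i =>
      if i = 'H' then (true, p.2)
      else (false, if i = 'C' ∧ p.1 = true then true else p.2))
    (false, false)
  if st.2 = true then "Hard Control" else "Soft Control"

-- ===== PORT B =====
def Type_of_controll_alt (line : String) : String :=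
  if PySem.Str.isIn "HC" line then "Hard Control" else "Soft Control"

-- ===== PRECONDITION & SPEC =====
def Spec_Type_of_controll (line : String) (out : String) : Prop := out = Type_of_controll_alt line
instance (line : String) (out : String) : Decidable (Spec_Type_of_controll line out) := by unfold Spec_Type_of_controll; infer_instance

-- ===== CLAIM (what is proved, stated in full; the proofs are below) =====
def Claim_equal_Type_of_controll : Prop := ∀ (line : String), Dom_Type_of_controll line → Spec_Type_of_controll line (Type_of_controll line)

-- ===== LEMMAS AND PROOFS =====

-- the hc flag A's scan produces, as a recursion over the characters
def pvAux (vc : Bool) : List Char → Bool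
  | [] => false
  | c :: rest => (vc && (c == 'C')) || pvAux (c == 'H') rest

lemma pvFoldl_eq_aux (l : List Char) : ∀ (vc hc : Bool),
    (l.foldl (fun (p : Bool × Bool) i =>
      if i = 'H' then (true, p.2)
      else (false, if i = 'C' ∧ p.1 = true then true else p.2)) (vc, hc)).2
    = (hc || pvAux vc l) := by
  induction l with
  | nil => simp [pvAux]
  | cons c rest ih =>
    intro vc hc
    rw [List.foldl_cons]
    by_cases hH : c = 'H'
    · rw [if_pos hH, ih]
      subst hH
      simp [pvAux]
    · rw [if_neg hH, ih]
      by_cases hC : c = 'C'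
      · subst hC
        cases vc <;> simp [pvAux]
      · have hcond : ¬ (c = 'C' ∧ vc = true) := fun h => hC h.1
        rw [if_neg hcond]
        have h1 : (c == 'C') = false := by simp [hC]
        have h2 : (c == 'H') = false := by simp [hH]
        simp [pvAux, h1, h2]

lemma pvAux_mono (l : List Char) (b : Bool) :
    pvAux false l = true → pvAux b l = true := by
  cases l with
  | nil => simp [pvAux]
  | cons d t =>
    intro h
    simp only [pvAux, Bool.false_and, Bool.false_or] at h
    simp [pvAux, h]

lemma pvAux_false_iff_infix (l : List Char) :
    pvAux false l = true ↔ ['H', 'C'] <:+: l := by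
  induction l with
  | nil => simp [pvAux]
  | cons c rest ih =>
    rw [List.infix_cons_iff]
    constructor
    · intro h
      simp only [pvAux, Bool.false_and, Bool.false_or] at h
      cases rest with
      | nil => simp [pvAux] at h
      | cons d t =>
        simp only [pvAux] at h
        rcases Bool.or_eq_true_iff.mp h with h1 | h2
        · left
          have hc : c = 'H' := by
            by_contra hc; simp [hc] at h1
          have hd : d = 'C' := by
            by_contra hd; simp [hd] at h1
          subst hc; subst hd
          exact ⟨t, rfl⟩
        · right
          exact ih.mp (by simp [pvAux, h2])
    · rintro (hp | hi)
      · obtain ⟨t, ht⟩ := hp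
        cases ht
        simp [pvAux]
      · have h2 := ih.mpr hi
        simp only [pvAux, Bool.false_and, Bool.false_or]
        exact pvAux_mono rest _ h2

-- ===== VERDICT (by name: the statement is the Claim_ definition above) =====
theorem Type_of_controll_spec : Claim_equal_Type_of_controll := by
  intro line _
  unfold Spec_Type_of_controll Type_of_controll Type_of_controll_alt
  dsimp only
  rw [pvFoldl_eq_aux]
  simp only [Bool.false_or]
  have h1 : PySem.Str.isIn "HC" line = true ↔ ['H', 'C'] <:+: line.toList := by
    rw [PySem.Str.isIn_iff_infix]
    exact Iff.rfl
  by_cases hin : ['H', 'C'] <:+: line.toList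
  · rw [if_pos ((pvAux_false_iff_infix _).mpr hin), if_pos (h1.mpr hin)]
  · rw [if_neg (fun h => hin ((pvAux_false_iff_infix _).mp h)),
        if_neg (fun h => hin (h1.mp h))]
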